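-- pv_equiv track=rewrite | github.com/zygarde-intermittent/zygarde | code/ETA-Factor/general_CEE.py | countPlus
-- ===== SOURCE A (Python) =====
-- def countPlus(binary, size):
--     plus = []
--     totalP = []
--     for n in range(1, size):
--         pl = 0
--         mn = 0
--         ttl = 0
--         for i in range(n, len(binary)-1):
--             flag = 1
--             for j in range(1, n):
--                 if(binary[i-j] == 0):
--                     flag = 0
--             if (flag == 1):
--                 if(binary[i] == 1):
--                     pl = pl+1
--                 ttl = ttl + 1
--         plus.append(pl)
--         totalP.append(ttl)
--     return plus, totalP
-- ===== SOURCE B (Python) =====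
-- def countPlus(binary, size):
--     L = len(binary)
--     # run[i] = number of consecutive nonzero entries ending just before index i
--     run = [0]
--     c = 0
--     for x in binary:
--         c = c + 1 if x != 0 else 0
--         run.append(c)
--     plus = []
--     totalP = []
--     for n in range(1, size):
--         pl = 0
--         ttl = 0
--         for i in range(n, L - 1):
--             if run[i] >= n - 1:
--                 ttl += 1
--                 if binary[i] == 1:
--                     pl += 1
--         plus.append(pl)
--         totalP.append(ttl)
--     return plus, totalP
-- ===== Notes on version B (the rewrite author's own statement) =====
-- stated objective: faster
-- what changed: B precomputes, in one pass, the length of the consecutive-nonzero run ending before each index, so A's inner rescan of the n-1 previous entries becomes a single comparison run[i] >= n-1.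
import Mathlib
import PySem

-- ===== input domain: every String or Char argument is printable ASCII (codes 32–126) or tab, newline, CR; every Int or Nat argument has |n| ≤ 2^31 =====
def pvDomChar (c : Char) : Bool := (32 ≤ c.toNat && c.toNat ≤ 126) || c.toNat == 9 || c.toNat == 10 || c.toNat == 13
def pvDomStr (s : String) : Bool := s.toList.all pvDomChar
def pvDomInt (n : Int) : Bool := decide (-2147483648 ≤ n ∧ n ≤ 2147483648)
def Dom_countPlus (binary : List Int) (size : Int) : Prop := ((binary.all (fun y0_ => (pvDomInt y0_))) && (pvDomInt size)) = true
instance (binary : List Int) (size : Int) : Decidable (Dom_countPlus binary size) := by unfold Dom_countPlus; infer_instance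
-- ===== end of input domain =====

-- B precomputes the nonzero-run lengths once, replacing A's inner all-nonzero rescan by one
-- comparison (objective: faster, O(size·len) instead of A's O(size²·len)).

-- ===== PORT A =====
def countPlus (binary : List Int) (size : Int) : List Int × List Int :=
  (PySem.List.pyRange 1 size 1).foldl
    (fun (acc : List Int × List Int) n =>
      let st := (PySem.List.pyRange n ((binary.length : Int) - 1) 1).foldl
        (fun (s : Int × Int) i =>
          let flag : Int := (PySem.List.pyRange 1 n 1).foldl
            (fun flag j => if PySem.List.pyGetD binary (i - j) 0 = 0 then 0 else flag) 1
          if flag = 1 then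
            ((if PySem.List.pyGetD binary i 0 = 1 then s.1 + 1 else s.1), s.2 + 1)
          else s)
        (0, 0)
      (acc.1 ++ [st.1], acc.2 ++ [st.2]))
    ([], [])

-- ===== PORT B =====
-- run-length list: element i is the number of consecutive nonzero entries ending just before index i
def pvRunList (binary : List Int) : List Int :=
  (binary.foldl
    (fun (s : List Int × Int) x =>
      let c := if x ≠ 0 then s.2 + 1 else 0
      (s.1 ++ [c], c))
    ([0], 0)).1

def countPlus_alt (binary : List Int) (size : Int) : List Int × List Int :=
  let L : Int := binary.length
  let run := pvRunList binary
  (PySem.List.pyRange 1 size 1).foldl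
    (fun (acc : List Int × List Int) n =>
      let st := (PySem.List.pyRange n (L - 1) 1).foldl
        (fun (s : Int × Int) i =>
          if n - 1 ≤ PySem.List.pyGetD run i 0 then
            ((if PySem.List.pyGetD binary i 0 = 1 then s.1 + 1 else s.1), s.2 + 1)
          else s)
        (0, 0)
      (acc.1 ++ [st.1], acc.2 ++ [st.2]))
    ([], [])

-- ===== PRECONDITION & SPEC =====
def Spec_countPlus (binary : List Int) (size : Int) (out : List Int × List Int) : Prop := out = countPlus_alt binary size
instance (binary : List Int) (size : Int) (out : List Int × List Int) : Decidable (Spec_countPlus binary size out) := by unfold Spec_countPlus; infer_instance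

-- ===== CLAIM (what is proved, stated in full; the proofs are below) =====
def Claim_equal_countPlus : Prop := ∀ (binary : List Int) (size : Int), Dom_countPlus binary size → Spec_countPlus binary size (countPlus binary size)

-- ===== LEMMAS AND PROOFS =====

-- mathematical value of B's running counter after a prefix
def pvRv (xs : List Int) : Int := xs.foldl (fun c x => if x ≠ 0 then c + 1 else 0) 0

theorem pvRv_append (xs : List Int) (a : Int) :
    pvRv (xs ++ [a]) = if a ≠ 0 then pvRv xs + 1 else 0 := by
  simp [pvRv, List.foldl_append]

theorem pvRv_nonneg (xs : List Int) : 0 ≤ pvRv xs := by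
  induction xs using List.reverseRecOn with
  | nil => simp [pvRv]
  | append_singleton xs a ih =>
    rw [pvRv_append]
    split_ifs with h
    · omega
    · omega

theorem pvRunList_eq (xs : List Int) :
    pvRunList xs = (List.range (xs.length + 1)).map (fun k => pvRv (xs.take k)) := by
  suffices h : xs.foldl
      (fun (s : List Int × Int) x =>
        let c := if x ≠ 0 then s.2 + 1 else 0
        (s.1 ++ [c], c))
      ([0], 0)
      = ((List.range (xs.length + 1)).map (fun k => pvRv (xs.take k)), pvRv xs) by
    simp only [pvRunList]
    rw [h]
  induction xs using List.reverseRecOn with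
  | nil => simp [pvRv]
  | append_singleton xs a ih =>
    rw [List.foldl_append, ih]
    simp only [List.foldl_cons, List.foldl_nil, List.length_append, List.length_singleton]
    rw [Prod.mk.injEq]
    refine ⟨?_, ?_⟩
    · have hr : (List.range (xs.length + 1 + 1)).map (fun k => pvRv ((xs ++ [a]).take k))
          = (List.range (xs.length + 1)).map (fun k => pvRv ((xs ++ [a]).take k))
            ++ [pvRv ((xs ++ [a]).take (xs.length + 1))] := by
        rw [List.range_succ, List.map_append, List.map_cons, List.map_nil]
      rw [hr]
      congr 1
      · apply List.map_congr_left
        intro k hk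
        rw [List.mem_range] at hk
        rw [List.take_append_of_le_length (by omega)]
      · rw [List.take_of_length_le (by simp), pvRv_append]
    · rw [pvRv_append]

theorem pvRv_ge_iff (xs : List Int) (m : Nat) (hm : m ≤ xs.length) :
    (m : Int) ≤ pvRv xs ↔ ∀ j : Nat, j < m → xs.getD (xs.length - 1 - j) 0 ≠ 0 := by
  induction xs using List.reverseRecOn generalizing m with
  | nil =>
    simp at hm
    subst hm
    simp [pvRv]
  | append_singleton xs a ih =>
    cases m with
    | zero =>
      constructor
      · intro _ j hj; omega
      · intro _; exact pvRv_nonneg _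
    | succ m' =>
      have hlen : (xs ++ [a]).length = xs.length + 1 := by simp
      have hm' : m' ≤ xs.length := by simp at hm; omega
      rw [pvRv_append]
      constructor
      · intro h j hj
        have ha : a ≠ 0 := by
          intro ha0; rw [if_neg (by simp [ha0])] at h; omega
        rw [if_pos ha] at h
        rcases Nat.eq_zero_or_pos j with hj0 | hjpos
        · subst hj0
          rw [hlen]
          simpa using ha
        · obtain ⟨j', rfl⟩ : ∃ j', j = j' + 1 := ⟨j - 1, by omega⟩
          have hidx : (xs ++ [a]).length - 1 - (j' + 1) = xs.length - 1 - j' := by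
            rw [hlen]; omega
          rw [hidx, List.getD_append _ _ _ _ (by omega)]
          exact ((ih m' hm').mp (by omega)) j' (by omega)
      · intro h
        have ha : a ≠ 0 := by
          have := h 0 (by omega)
          rw [hlen] at this
          simpa using this
        rw [if_pos ha]
        have : (m' : Int) ≤ pvRv xs := by
          rw [ih m' hm']
          intro j' hj'
          have hidx : (xs ++ [a]).length - 1 - (j' + 1) = xs.length - 1 - j' := by
            rw [hlen]; omega
          have := h (j' + 1) (by omega)
          rw [hidx, List.getD_append _ _ _ _ (by omega)] at this
          exact this
        push_cast
        omega

-- A's flag loop: 1 iff no scanned position holds a zero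
theorem pvFoldl_flag (l : List Int) (p : Int → Prop) [DecidablePred p] (init : Int) :
    l.foldl (fun f j => if p j then 0 else f) init
      = if ∀ j ∈ l, ¬ p j then init else 0 := by
  induction l generalizing init with
  | nil => simp
  | cons a l ih =>
    rw [List.foldl_cons, ih]
    by_cases hpa : p a <;> by_cases hall : ∀ j ∈ l, ¬ p j <;>
      simp [hpa, hall]

theorem pv_getD_take (l : List Int) (n k : Nat) (h : k < n) :
    (l.take n).getD k 0 = l.getD k 0 := by
  by_cases hk : k < l.length
  · rw [List.getD_eq_getElem _ _ (by simp; omega), List.getD_eq_getElem _ _ hk,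
      List.getElem_take]
  · rw [List.getD_eq_default _ _ (by simp; omega), List.getD_eq_default _ _ (by omega)]

-- the conditions of the two inner branches agree on every scanned index
theorem pv_cond_iff (binary : List Int) (n i : Int) (hn : 1 ≤ n) (hni : n ≤ i)
    (hi : i < (binary.length : Int) - 1) :
    ((PySem.List.pyRange 1 n 1).foldl
        (fun (flag : Int) j => if PySem.List.pyGetD binary (i - j) 0 = 0 then 0 else flag) (1 : Int) = 1)
      ↔ n - 1 ≤ PySem.List.pyGetD (pvRunList binary) i 0 := by
  have h0i : 0 ≤ i := by omega
  have hiL : i.toNat < binary.length := by omega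
  have hrun : PySem.List.pyGetD (pvRunList binary) i 0 = pvRv (binary.take i.toNat) := by
    rw [PySem.List.pyGetD_of_nonneg _ _ h0i, pvRunList_eq,
      PySem.List.getD_map_range _ _ _ _ (by omega)]
  rw [hrun, pvFoldl_flag]
  have hlen : (binary.take i.toNat).length = i.toNat := by simp; omega
  have hiff := pvRv_ge_iff (binary.take i.toNat) (n - 1).toNat (by omega)
  rw [hlen] at hiff
  constructor
  · intro h
    have hall : ∀ j ∈ PySem.List.pyRange 1 n 1, ¬ PySem.List.pyGetD binary (i - j) 0 = 0 := by
      by_contra hc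
      rw [if_neg hc] at h
      omega
    have : ((n - 1).toNat : Int) ≤ pvRv (binary.take i.toNat) := by
      rw [hiff]
      intro j' hj'
      have hmem : ((j' : Int) + 1) ∈ PySem.List.pyRange 1 n 1 := by
        rw [PySem.List.mem_pyRange_one]; omega
      have := hall _ hmem
      rw [PySem.List.pyGetD_of_nonneg _ _ (by omega)] at this
      have hidx : (i - ((j' : Int) + 1)).toNat = i.toNat - 1 - j' := by omega
      rw [hidx] at this
      rw [pv_getD_take _ _ _ (by omega)]
      exact this
    omega
  · intro h
    rw [if_pos]
    intro j hj
    rw [PySem.List.mem_pyRange_one] at hj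
    have hjn : ∃ j' : Nat, (j' : Int) = j - 1 ∧ j' < (n - 1).toNat := ⟨(j - 1).toNat, by omega, by omega⟩
    obtain ⟨j', hj', hj'lt⟩ := hjn
    have hone := (hiff.mp (by omega)) j' hj'lt
    rw [pv_getD_take _ _ _ (by omega)] at hone
    have hidx : i.toNat - 1 - j' = (i - j).toNat := by omega
    rw [hidx] at hone
    rw [PySem.List.pyGetD_of_nonneg _ _ (by omega)]
    exact hone

-- ===== VERDICT (by name: the statement is the Claim_ definition above) =====
theorem countPlus_spec : Claim_equal_countPlus := by
  intro binary size _
  unfold Spec_countPlus countPlus countPlus_alt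
  apply PySem.List.foldl_congr_mem
  intro acc n hn
  rw [PySem.List.mem_pyRange_one] at hn
  have hinner : (PySem.List.pyRange n ((binary.length : Int) - 1) 1).foldl
      (fun (s : Int × Int) i =>
        let flag : Int := (PySem.List.pyRange 1 n 1).foldl
          (fun flag j => if PySem.List.pyGetD binary (i - j) 0 = 0 then 0 else flag) 1
        if flag = 1 then
          ((if PySem.List.pyGetD binary i 0 = 1 then s.1 + 1 else s.1), s.2 + 1)
        else s) (0, 0)
      = (PySem.List.pyRange n ((binary.length : Int) - 1) 1).foldl
      (fun (s : Int × Int) i =>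
        if n - 1 ≤ PySem.List.pyGetD (pvRunList binary) i 0 then
          ((if PySem.List.pyGetD binary i 0 = 1 then s.1 + 1 else s.1), s.2 + 1)
        else s) (0, 0) := by
    apply PySem.List.foldl_congr_mem
    intro s i hi
    rw [PySem.List.mem_pyRange_one] at hi
    exact if_congr (pv_cond_iff binary n i hn.1 hi.1 hi.2) rfl rfl
  rw [hinner]
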